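-- pv_equiv track=rewrite | github.com/dennisjooo/moodlist | backend/app/agents/recommender/mood_analyzer/analysis/mood_analysis_engine.py | _infer_excluded_themes
-- ===== SOURCE A (Python) =====
-- from typing import Any, Dict, List, Optional, Union
--
-- def _infer_excluded_themes(prompt_lower: str) -> List[str]:
--     """Infer themes that should be excluded from the mood prompt.
--
--     Args:
--         prompt_lower: Lowercase mood prompt
--
--     Returns:
--         List of excluded themes
--     """
--     excluded = []
--
--     # Check if specific themes are explicitly requested (then don't exclude them)
--     if any(
--         term in prompt_lower for term in ["christmas", "holiday", "xmas", "festive"]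
--     ):
--         # User wants holiday music, don't exclude it
--         return []
--
--     if any(
--         term in prompt_lower for term in ["gospel", "worship", "praise", "church"]
--     ):
--         # User wants religious music, don't exclude it
--         return []
--
--     if any(term in prompt_lower for term in ["kids", "children", "nursery"]):
--         # User wants kids music, don't exclude it
--         return []
--
--     # Default exclusions for most playlists (unless explicitly requested above)
--     # Most people don't want holiday songs in their regular playlists
--     excluded.extend(["holiday", "christmas"])
--
--     # For specific genres/moods, add more exclusions
--     if any(
--         term in prompt_lower
--         for term in ["romantic", "date", "dinner", "intimate", "sensual"]
--     ):
--         # Romantic moods should exclude religious themes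
--         excluded.extend(["religious", "kids"])
--
--     if any(
--         term in prompt_lower for term in ["workout", "gym", "exercise", "running"]
--     ):
--         # Workout playlists should exclude slow/ballad themes
--         excluded.extend(["religious", "kids"])
--
--     if any(term in prompt_lower for term in ["party", "dance", "club", "hype"]):
--         # Party moods should exclude solemn themes
--         excluded.extend(["religious", "kids"])
--
--     if any(
--         term in prompt_lower
--         for term in ["chill", "relax", "study", "focus", "ambient"]
--     ):
--         # Chill/focus moods should exclude comedy and kids
--         excluded.extend(["comedy", "kids"])
--
--     # Remove duplicates
--     return list(set(excluded))
-- ===== SOURCE B (Python) =====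
-- # Different algorithm: instead of scanning each keyword over the prompt, slide a
-- # window over the prompt once per keyword group and test each slice against a
-- # keyword hash set (text-driven matching with an index, not keyword-driven scans).
-- _OVERRIDE_KWS = frozenset([
--     "christmas", "holiday", "xmas", "festive",
--     "gospel", "worship", "praise", "church",
--     "kids", "children", "nursery",
-- ])
-- _SOCIAL_KWS = frozenset([
--     "romantic", "date", "dinner", "intimate", "sensual",
--     "workout", "gym", "exercise", "running",
--     "party", "dance", "club", "hype",
-- ])
-- _CALM_KWS = frozenset(["chill", "relax", "study", "focus", "ambient"])
--
--
-- def _window_hit(prompt_lower, keywords):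
--     """Slide a window over the prompt; test each slice against the keyword set."""
--     lengths = {len(k) for k in keywords}
--     return any(prompt_lower[i:i + n] in keywords
--                for i in range(len(prompt_lower)) for n in lengths)
--
--
-- def _infer_excluded_themes(prompt_lower):
--     if _window_hit(prompt_lower, _OVERRIDE_KWS):
--         return []
--     excluded = ["holiday", "christmas"]
--     if _window_hit(prompt_lower, _SOCIAL_KWS):
--         excluded += ["religious", "kids"]
--     if _window_hit(prompt_lower, _CALM_KWS):
--         excluded += ["comedy", "kids"]
--     return list(set(excluded))
-- ===== Notes on version B (the rewrite author's own statement) =====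
-- stated objective: alternative
-- what changed: Inverts the matching direction: instead of testing each keyword for substring containment in the prompt, B slides a window over the prompt and checks each slice against a keyword hash set per category (text-driven matching with an index), then assembles the exclusions from the three category hits and dedups with list(set(...)).
import Mathlib
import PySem

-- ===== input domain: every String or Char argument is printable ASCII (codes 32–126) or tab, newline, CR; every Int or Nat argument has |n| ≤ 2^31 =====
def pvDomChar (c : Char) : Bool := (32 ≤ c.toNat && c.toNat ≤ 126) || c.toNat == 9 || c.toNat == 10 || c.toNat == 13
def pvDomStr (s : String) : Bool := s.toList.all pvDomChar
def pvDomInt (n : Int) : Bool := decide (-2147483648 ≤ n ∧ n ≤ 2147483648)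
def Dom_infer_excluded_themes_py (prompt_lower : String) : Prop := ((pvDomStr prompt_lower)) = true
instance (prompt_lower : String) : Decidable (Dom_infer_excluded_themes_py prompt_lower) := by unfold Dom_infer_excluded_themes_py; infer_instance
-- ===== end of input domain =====

-- B inverts the matching direction: it slides a window over the prompt and tests each slice
-- against a per-category keyword set, then assembles the exclusions from the category hits
-- (alternative algorithm, same result).


-- ===== PORT A =====
-- 'term in prompt_lower' = PySem.Str.isIn; list(set(excluded)) = PySem.Set.ofList excluded.
def pvAnyIn (prompt_lower : String) (terms : List String) : Bool :=
  terms.any (fun t => PySem.Str.isIn t prompt_lower)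

def infer_excluded_themes_py (prompt_lower : String) : List String :=
  if pvAnyIn prompt_lower ["christmas", "holiday", "xmas", "festive"] then
    []
  else if pvAnyIn prompt_lower ["gospel", "worship", "praise", "church"] then
    []
  else if pvAnyIn prompt_lower ["kids", "children", "nursery"] then
    []
  else
    let excluded : List String := [] ++ ["holiday", "christmas"]
    let excluded :=
      if pvAnyIn prompt_lower ["romantic", "date", "dinner", "intimate", "sensual"] then
        excluded ++ ["religious", "kids"] else excluded
    let excluded :=
      if pvAnyIn prompt_lower ["workout", "gym", "exercise", "running"] then
        excluded ++ ["religious", "kids"] else excluded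
    let excluded :=
      if pvAnyIn prompt_lower ["party", "dance", "club", "hype"] then
        excluded ++ ["religious", "kids"] else excluded
    let excluded :=
      if pvAnyIn prompt_lower ["chill", "relax", "study", "focus", "ambient"] then
        excluded ++ ["comedy", "kids"] else excluded
    PySem.Set.ofList excluded

-- ===== PORT B =====
-- frozenset([...]) = PySem.Set.ofList [...].
def pvOverrideKws : PySem.Set String :=
  PySem.Set.ofList
    ["christmas", "holiday", "xmas", "festive",
     "gospel", "worship", "praise", "church",
     "kids", "children", "nursery"]

def pvSocialKws : PySem.Set String :=
  PySem.Set.ofList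
    ["romantic", "date", "dinner", "intimate", "sensual",
     "workout", "gym", "exercise", "running",
     "party", "dance", "club", "hype"]

def pvCalmKws : PySem.Set String :=
  PySem.Set.ofList ["chill", "relax", "study", "focus", "ambient"]

-- _window_hit: {len(k) for k in keywords} = Set.ofList (map Str.len), prompt_lower[i:i+n] = Str.slice,
-- 'in keywords' = Set.contains, the nested generator 'any(...)' = nested List.any.
def pvWindowHit (prompt_lower : String) (keywords : PySem.Set String) : Bool :=
  (PySem.List.pyRange 0 (PySem.Str.len prompt_lower) 1).any (fun i =>
    (PySem.Set.ofList (keywords.map PySem.Str.len)).any (fun n =>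
      PySem.Set.contains keywords
        (PySem.Str.slice prompt_lower (some i) (some (i + n)))))

def infer_excluded_themes_py_alt (prompt_lower : String) : List String :=
  if pvWindowHit prompt_lower pvOverrideKws then
    []
  else
    let excluded : List String := ["holiday", "christmas"]
    let excluded :=
      if pvWindowHit prompt_lower pvSocialKws then excluded ++ ["religious", "kids"]
      else excluded
    let excluded :=
      if pvWindowHit prompt_lower pvCalmKws then excluded ++ ["comedy", "kids"]
      else excluded
    PySem.Set.ofList excluded

-- ===== PRECONDITION & SPEC =====
def Spec_infer_excluded_themes_py (prompt_lower : String) (out : List String) : Prop := out = infer_excluded_themes_py_alt prompt_lower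
instance (prompt_lower : String) (out : List String) : Decidable (Spec_infer_excluded_themes_py prompt_lower out) := by unfold Spec_infer_excluded_themes_py; infer_instance

-- ===== CLAIM (what is proved, stated in full; the proofs are below) =====
def Claim_equal_infer_excluded_themes_py : Prop := ∀ (prompt_lower : String), Dom_infer_excluded_themes_py prompt_lower → Spec_infer_excluded_themes_py prompt_lower (infer_excluded_themes_py prompt_lower)

-- ===== LEMMAS AND PROOFS =====

-- The window scan finds a keyword of the set iff some keyword of the set occurs in the prompt.
lemma pvWindowHit_eq (p : String) (kws : List String)
    (hne : ∀ kw ∈ kws, kw.toList ≠ []) :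
    pvWindowHit p kws = kws.any (fun kw => PySem.Str.isIn kw p) := by
  apply Bool.eq_iff_iff.mpr
  simp only [pvWindowHit, List.any_eq_true]
  constructor
  · rintro ⟨i, hi, n, hn, hmem⟩
    rw [PySem.List.mem_pyRange_one] at hi
    rw [PySem.Set.contains_iff] at hmem
    refine ⟨_, hmem, ?_⟩
    rw [PySem.Str.isIn_iff_infix, PySem.Str.toList_slice, PySem.Chars.slice_eq_listSlice]
    have h0n : 0 ≤ n := by
      rw [PySem.Set.mem_ofList] at hn
      obtain ⟨kw', _, rfl⟩ := List.mem_map.mp hn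
      rw [PySem.Str.len_eq]
      positivity
    rw [PySem.List.slice_toNat _ hi.1 (by omega)]
    exact ((List.take_prefix _ _).isInfix).trans ((List.drop_suffix _ _).isInfix)
  · rintro ⟨kw, hkw, hin⟩
    have hin' : PySem.Chars.isIn kw.toList p.toList = true := by
      rw [← PySem.Str.isIn_eq]; exact hin
    obtain ⟨j, hpre⟩ := (PySem.Chars.exists_prefix_drop_iff_isIn _ _).mpr hin'
    have hkne := hne kw hkw
    have hjlt : j < p.toList.length := by
      by_contra h
      have hd : p.toList.drop j = [] := List.drop_eq_nil_of_le (by omega)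
      rw [hd] at hpre
      exact hkne (List.prefix_nil.mp hpre)
    have hl : (PySem.Str.slice p (some (j : Int))
        (some ((j : Int) + PySem.Str.len kw))).toList = kw.toList := by
      rw [PySem.Str.toList_slice, PySem.Chars.slice_eq_listSlice, PySem.Str.len_eq,
        PySem.List.slice_natCast_add]
      exact (List.prefix_iff_eq_take.mp hpre).symm
    have hslice : PySem.Str.slice p (some (j : Int))
        (some ((j : Int) + PySem.Str.len kw)) = kw := by
      have h2 := congrArg String.ofList hl
      simpa using h2
    refine ⟨(j : Int), ?_, PySem.Str.len kw, ?_, ?_⟩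
    · rw [PySem.List.mem_pyRange_one, PySem.Str.len_eq]
      constructor
      · positivity
      · exact_mod_cast hjlt
    · exact (PySem.Set.mem_ofList _ _).mpr (List.mem_map_of_mem hkw)
    · rw [PySem.Set.contains_iff, hslice]
      exact hkw

-- ===== VERDICT (by name: the statement is the Claim_ definition above) =====
theorem infer_excluded_themes_py_spec : Claim_equal_infer_excluded_themes_py := by
  intro p _
  unfold Spec_infer_excluded_themes_py infer_excluded_themes_py infer_excluded_themes_py_alt
  have hov : pvWindowHit p pvOverrideKws
      = (pvAnyIn p ["christmas", "holiday", "xmas", "festive"]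
         || pvAnyIn p ["gospel", "worship", "praise", "church"]
         || pvAnyIn p ["kids", "children", "nursery"]) := by
    have h : pvOverrideKws
        = ["christmas", "holiday", "xmas", "festive",
           "gospel", "worship", "praise", "church",
           "kids", "children", "nursery"] := by decide
    rw [h, pvWindowHit_eq _ _ (by decide)]
    simp [pvAnyIn, Bool.or_assoc]
  have hsoc : pvWindowHit p pvSocialKws
      = (pvAnyIn p ["romantic", "date", "dinner", "intimate", "sensual"]
         || pvAnyIn p ["workout", "gym", "exercise", "running"]
         || pvAnyIn p ["party", "dance", "club", "hype"]) := by
    have h : pvSocialKws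
        = ["romantic", "date", "dinner", "intimate", "sensual",
           "workout", "gym", "exercise", "running",
           "party", "dance", "club", "hype"] := by decide
    rw [h, pvWindowHit_eq _ _ (by decide)]
    simp [pvAnyIn, Bool.or_assoc]
  have hcal : pvWindowHit p pvCalmKws
      = pvAnyIn p ["chill", "relax", "study", "focus", "ambient"] := by
    have h : pvCalmKws = ["chill", "relax", "study", "focus", "ambient"] := by decide
    rw [h, pvWindowHit_eq _ _ (by decide)]
    simp [pvAnyIn]
  rw [hov, hsoc, hcal]
  cases h1 : pvAnyIn p ["christmas", "holiday", "xmas", "festive"] <;>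
    cases h2 : pvAnyIn p ["gospel", "worship", "praise", "church"] <;>
      cases h3 : pvAnyIn p ["kids", "children", "nursery"] <;>
        cases h4 : pvAnyIn p ["romantic", "date", "dinner", "intimate", "sensual"] <;>
          cases h5 : pvAnyIn p ["workout", "gym", "exercise", "running"] <;>
            cases h6 : pvAnyIn p ["party", "dance", "club", "hype"] <;>
              cases h7 : pvAnyIn p ["chill", "relax", "study", "focus", "ambient"] <;>
                decide
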